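-- pv_equiv track=rewrite | github.com/shurehw/RESTAURANT-APP | python-services/scheduler/auto_scheduler.py | _match_config_key
-- ===== SOURCE A (Python) =====
-- from typing import Dict, List, Optional, Tuple
--
-- def _match_config_key(position_name: str, config: dict) -> Optional[str]:
--     """Find best matching key in a config dict for a position name (case-insensitive)"""
--     name_lower = position_name.lower()
--     # Exact match
--     for key in config:
--         if key.lower() == name_lower:
--             return key
--     # Substring match (prefer longer matches)
--     matches = [(key, len(key)) for key in config if key.lower() in name_lower]
--     if matches:
--         return max(matches, key=lambda x: x[1])[0]
--     return None
-- ===== SOURCE B (Python) =====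
-- from typing import Dict, List, Optional, Tuple
--
-- def _match_config_key(position_name: str, config: dict) -> Optional[str]:
--     """Single pass: return an exact (case-insensitive) key eagerly; otherwise
--     keep the first longest substring match seen so far."""
--     name_lower = position_name.lower()
--     best = None
--     for key in config:
--         kl = key.lower()
--         if kl == name_lower:
--             return key
--         if kl in name_lower and (best is None or len(key) > best[1]):
--             best = (key, len(key))
--     return best[0] if best else None
-- ===== Notes on version B (the rewrite author's own statement) =====
-- stated objective: alternative
-- what changed: Replaces A's two sequential scans (an exact-match pass, then a comprehension plus max over substring matches) with a single loop that returns eagerly on an exact match and otherwise maintains the running first-longest substring match.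
import Mathlib
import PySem

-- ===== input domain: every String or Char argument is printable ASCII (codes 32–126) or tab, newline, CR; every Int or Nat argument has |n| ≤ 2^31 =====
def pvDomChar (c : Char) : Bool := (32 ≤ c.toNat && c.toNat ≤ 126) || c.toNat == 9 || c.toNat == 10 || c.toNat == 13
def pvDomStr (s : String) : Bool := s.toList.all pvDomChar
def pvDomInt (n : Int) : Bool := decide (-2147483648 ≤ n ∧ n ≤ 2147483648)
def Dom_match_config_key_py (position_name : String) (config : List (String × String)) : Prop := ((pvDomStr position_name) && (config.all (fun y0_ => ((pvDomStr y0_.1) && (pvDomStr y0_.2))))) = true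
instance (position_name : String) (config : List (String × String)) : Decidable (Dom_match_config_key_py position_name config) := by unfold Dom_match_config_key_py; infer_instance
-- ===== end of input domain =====

-- B merges A's two scans into one early-returning loop with a running best; objective: alternative decomposition, same cost.

-- ===== PORT A =====
-- first loop of A: return the first key whose .lower() equals name_lower
def pvAExact (nl : String) : List (String × String) → Option String
  | [] => none
  | kv :: t => if PySem.Str.lower kv.1 = nl then some kv.1 else pvAExact nl t

def match_config_key_py (position_name : String) (config : List (String × String)) : Option String :=
  let nameLower := PySem.Str.lower position_name
  match pvAExact nameLower config with
  | some k => some k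
  | none =>
    -- matches = [(key, len(key)) for key in config if key.lower() in name_lower]
    let ms := (config.filter (fun kv => PySem.Str.isIn (PySem.Str.lower kv.1) nameLower)).map
      (fun kv => (kv.1, (PySem.Str.len kv.1 : Int)))
    -- if matches: return max(matches, key=lambda x: x[1])[0]
    match PySem.List.max? ms (fun x => x.2) with
    | some m => some m.1
    | none => none

-- ===== PORT B =====
-- single pass of Source B: eager exact return, running (best_key, best_len)
def pvBLoop (nl : String) : List (String × String) → Option (String × Int) → Option String
  | [], best => best.map Prod.fst
  | kv :: t, best =>
    let kl := PySem.Str.lower kv.1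
    if kl = nl then some kv.1
    else if PySem.Str.isIn kl nl &&
           (match best with | none => true | some b => decide (b.2 < (PySem.Str.len kv.1 : Int))) then
      pvBLoop nl t (some (kv.1, (PySem.Str.len kv.1 : Int)))
    else pvBLoop nl t best

def match_config_key_py_alt (position_name : String) (config : List (String × String)) : Option String :=
  pvBLoop (PySem.Str.lower position_name) config none

-- ===== PRECONDITION & SPEC =====
def Spec_match_config_key_py (position_name : String) (config : List (String × String)) (out : Option String) : Prop := out = match_config_key_py_alt position_name config
instance (position_name : String) (config : List (String × String)) (out : Option String) : Decidable (Spec_match_config_key_py position_name config out) := by unfold Spec_match_config_key_py; infer_instance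

-- ===== CLAIM (what is proved, stated in full; the proofs are below) =====
def Claim_equal_match_config_key_py : Prop := ∀ (position_name : String) (config : List (String × String)), Dom_match_config_key_py position_name config → Spec_match_config_key_py position_name config (match_config_key_py position_name config)

-- ===== LEMMAS AND PROOFS =====

-- the fold step of PySem.List.max? at key (·.2), named so it can be reasoned about
def pvStep : Option (String × Int) → String × Int → Option (String × Int)
  | none, x => some x
  | some m, x => if m.2 < x.2 then some x else some m

-- If A's exact pass finds a key, B's loop returns that same key whatever its accumulator is.
theorem pvBLoop_of_exact (nl : String) (config : List (String × String)) (k : String)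
    (h : pvAExact nl config = some k) (best : Option (String × Int)) :
    pvBLoop nl config best = some k := by
  induction config generalizing best with
  | nil => simp [pvAExact] at h
  | cons kv t ih =>
    by_cases he : PySem.Str.lower kv.1 = nl
    · rw [pvAExact, if_pos he] at h
      simp only [pvBLoop]
      rw [if_pos he, h]
    · rw [pvAExact, if_neg he] at h
      simp only [pvBLoop]
      rw [if_neg he]
      split_ifs <;> exact ih h _

-- If no key is exact, B's loop is the max?-fold over A's candidate list, started at `best`.
theorem pvBLoop_of_no_exact (nl : String) (config : List (String × String))
    (h : ∀ kv ∈ config, ¬ PySem.Str.lower kv.1 = nl) (best : Option (String × Int)) :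
    pvBLoop nl config best =
      (((config.filter (fun kv => PySem.Str.isIn (PySem.Str.lower kv.1) nl)).map
          (fun kv => (kv.1, (PySem.Str.len kv.1 : Int)))).foldl pvStep best).map Prod.fst := by
  induction config generalizing best with
  | nil => rfl
  | cons kv t ih =>
    have he : ¬ PySem.Str.lower kv.1 = nl := h kv (List.mem_cons_self)
    have ht : ∀ x ∈ t, ¬ PySem.Str.lower x.1 = nl := fun x hx => h x (List.mem_cons_of_mem _ hx)
    simp only [pvBLoop]
    rw [if_neg he, List.filter_cons]
    by_cases hin : PySem.Str.isIn (PySem.Str.lower kv.1) nl = true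
    · rw [if_pos hin, List.map_cons, List.foldl_cons]
      cases best with
      | none =>
        rw [if_pos (by rw [hin]; rfl), ih ht]
        rfl
      | some b =>
        by_cases hlt : b.2 < (PySem.Str.len kv.1 : Int)
        · rw [if_pos (by rw [hin, Bool.true_and]; exact decide_eq_true hlt), ih ht]
          have hs : pvStep (some b) (kv.1, (PySem.Str.len kv.1 : Int)) =
              some (kv.1, (PySem.Str.len kv.1 : Int)) := if_pos hlt
          rw [hs]
        · rw [if_neg (by rw [hin, Bool.true_and]; simp only [decide_eq_true_eq]; exact hlt), ih ht]
          have hs : pvStep (some b) (kv.1, (PySem.Str.len kv.1 : Int)) = some b := if_neg hlt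
          rw [hs]
    · rw [if_neg (by simp only [Bool.and_eq_true]; rintro ⟨h1, -⟩; exact hin h1), if_neg hin, ih ht]

-- aExact = none means no key is exact.
theorem pvAExact_none_iff (nl : String) (config : List (String × String)) :
    pvAExact nl config = none ↔ ∀ kv ∈ config, ¬ PySem.Str.lower kv.1 = nl := by
  induction config with
  | nil => simp [pvAExact]
  | cons kv t ih =>
    by_cases he : PySem.Str.lower kv.1 = nl <;> simp [pvAExact, he, ih]

-- ===== VERDICT (by name: the statement is the Claim_ definition above) =====
theorem match_config_key_py_spec : Claim_equal_match_config_key_py := by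
  intro position_name config _
  show match_config_key_py position_name config = match_config_key_py_alt position_name config
  rw [match_config_key_py, match_config_key_py_alt]
  cases hE : pvAExact (PySem.Str.lower position_name) config with
  | some k => exact (pvBLoop_of_exact _ config k hE none).symm
  | none =>
    rw [pvBLoop_of_no_exact _ config ((pvAExact_none_iff _ config).1 hE) none]
    have hmax : PySem.List.max?
        (((config.filter (fun kv => PySem.Str.isIn (PySem.Str.lower kv.1) (PySem.Str.lower position_name))).map
          (fun kv => (kv.1, (PySem.Str.len kv.1 : Int)))))
        (fun x => x.2) =
        (((config.filter (fun kv => PySem.Str.isIn (PySem.Str.lower kv.1) (PySem.Str.lower position_name))).map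
          (fun kv => (kv.1, (PySem.Str.len kv.1 : Int)))).foldl pvStep none) := by
      simp only [PySem.List.max?]
      congr 1
      funext acc x
      cases acc <;> rfl
    show (match PySem.List.max?
        (((config.filter (fun kv => PySem.Str.isIn (PySem.Str.lower kv.1) (PySem.Str.lower position_name))).map
          (fun kv => (kv.1, (PySem.Str.len kv.1 : Int))))) (fun x => x.2) with
      | some m => some m.1
      | none => none) = _
    rw [hmax]
    cases ((config.filter (fun kv => PySem.Str.isIn (PySem.Str.lower kv.1) (PySem.Str.lower position_name))).map
          (fun kv => (kv.1, (PySem.Str.len kv.1 : Int)))).foldl pvStep none <;> rfl
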